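-- pv_equiv track=rewrite | github.com/think41/extrasuite | extradoc/src/extradoc/request_generators/table.py | calculate_cell_positions
-- ===== SOURCE A (Python) =====
-- def calculate_cell_positions(
--     table_start: int,
--     rows: int,
--     cols: int,
-- ) -> dict[tuple[int, int], int]:
--     """Calculate the insertion index for each cell in a freshly inserted table.
--
--     For a newly inserted table with empty cells, calculates the index where
--     content should be inserted for each (row, col) position.
--
--     Table structure in Google Docs:
--     - table_start: table marker (1 index)
--     - row_start: row marker (1 index per row)
--     - cell_start: cell marker (1 index per cell)
--     - cell_content: empty paragraph (1 index for newline)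
--     - table_end: end marker (1 index)
--
--     Args:
--         table_start: The start index of the table
--         rows: Number of rows in the table
--         cols: Number of columns in the table
--
--     Returns:
--         Dict mapping (row, col) tuples to cell content insertion indexes
--     """
--     positions: dict[tuple[int, int], int] = {}
--     idx = table_start + 1  # After table start marker
--
--     for row in range(rows):
--         idx += 1  # Row marker
--         for col in range(cols):
--             idx += 1  # Cell marker
--             positions[(row, col)] = idx
--             idx += 1  # Default empty paragraph (1 character for newline)
--
--     return positions
-- ===== SOURCE B (Python) =====
-- def calculate_cell_positions(
--     table_start: int,
--     rows: int,
--     cols: int,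
-- ) -> dict[tuple[int, int], int]:
--     """Closed-form: each cell's index is derived directly from its coordinates."""
--     return {
--         (row, col): table_start + 3 + row * (1 + 2 * cols) + 2 * col
--         for row in range(rows)
--         for col in range(cols)
--     }
-- ===== Notes on version B (the rewrite author's own statement) =====
-- stated objective: simpler
-- what changed: Replaces the running idx accumulator and dict mutation with a dict comprehension computing each cell's index by the closed form table_start + 3 + row*(1+2*cols) + 2*col.
import Mathlib
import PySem

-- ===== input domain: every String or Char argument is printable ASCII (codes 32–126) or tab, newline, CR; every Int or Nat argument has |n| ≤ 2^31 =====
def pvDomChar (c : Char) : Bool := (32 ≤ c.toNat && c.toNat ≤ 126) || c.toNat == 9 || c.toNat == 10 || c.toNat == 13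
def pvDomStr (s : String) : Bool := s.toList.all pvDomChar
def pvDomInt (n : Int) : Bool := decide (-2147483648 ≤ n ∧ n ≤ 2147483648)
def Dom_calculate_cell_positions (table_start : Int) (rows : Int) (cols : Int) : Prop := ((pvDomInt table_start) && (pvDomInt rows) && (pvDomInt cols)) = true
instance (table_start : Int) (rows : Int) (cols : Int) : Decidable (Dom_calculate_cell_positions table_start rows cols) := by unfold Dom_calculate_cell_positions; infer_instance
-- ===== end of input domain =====

-- B replaces A's running idx accumulator with a per-cell closed-form index (simpler decomposition, same cost).
-- The Python dict keys (row, col) are always fresh, so dict insertion is ported exactly as appending to the items list.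

-- ===== PORT A =====
-- inner loop body: idx += 1; positions[(row, col)] = idx; idx += 1
def pvInnerA (row : Int) (st : List (Int × Int × Int) × Int) (col : Int) : List (Int × Int × Int) × Int :=
  let idx := st.2 + 1
  (st.1 ++ [(row, col, idx)], idx + 1)

-- outer loop body: idx += 1 (row marker); then the inner loop over cols
def pvOuterA (cols : Int) (st : List (Int × Int × Int) × Int) (row : Int) : List (Int × Int × Int) × Int :=
  (PySem.List.pyRange 0 cols 1).foldl (pvInnerA row) (st.1, st.2 + 1)

def calculate_cell_positions (table_start : Int) (rows : Int) (cols : Int) : List (Int × Int × Int) :=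
  ((PySem.List.pyRange 0 rows 1).foldl (pvOuterA cols) (([] : List (Int × Int × Int)), table_start + 1)).1

-- ===== PORT B =====
def calculate_cell_positions_alt (table_start : Int) (rows : Int) (cols : Int) : List (Int × Int × Int) :=
  (PySem.List.pyRange 0 rows 1).flatMap (fun row =>
    (PySem.List.pyRange 0 cols 1).map (fun col =>
      (row, col, table_start + 3 + row * (1 + 2 * cols) + 2 * col)))

-- ===== PRECONDITION & SPEC =====
def Spec_calculate_cell_positions (table_start : Int) (rows : Int) (cols : Int) (out : List (Int × Int × Int)) : Prop := out = calculate_cell_positions_alt table_start rows cols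
instance (table_start : Int) (rows : Int) (cols : Int) (out : List (Int × Int × Int)) : Decidable (Spec_calculate_cell_positions table_start rows cols out) := by unfold Spec_calculate_cell_positions; infer_instance

-- ===== CLAIM (what is proved, stated in full; the proofs are below) =====
def Claim_equal_calculate_cell_positions : Prop := ∀ (table_start : Int) (rows : Int) (cols : Int), Dom_calculate_cell_positions table_start rows cols → Spec_calculate_cell_positions table_start rows cols (calculate_cell_positions table_start rows cols)

-- ===== LEMMAS AND PROOFS =====

lemma pvInner_closed (row : Int) (n : Nat) (acc : List (Int × Int × Int)) (idx : Int) :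
    ((List.range n).map (fun k : Nat => (k : Int))).foldl (pvInnerA row) (acc, idx)
      = (acc ++ (List.range n).map (fun c : Nat => (row, (c : Int), idx + 1 + 2 * c)),
         idx + 2 * n) := by
  induction n with
  | zero => simp
  | succ n ih =>
      rw [List.range_succ, List.map_append, List.foldl_append, ih]
      simp [pvInnerA]
      constructor
      · ring_nf
      · ring

lemma pvOuter_closed (cols : Int) (m : Nat) (acc : List (Int × Int × Int)) (idx : Int) :
    ((List.range m).map (fun k : Nat => (k : Int))).foldl (pvOuterA cols) (acc, idx)
      = (acc ++ (List.range m).flatMap (fun r : Nat =>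
            (List.range cols.toNat).map (fun c : Nat =>
              ((r : Int), (c : Int), idx + 2 + r * (1 + 2 * (cols.toNat : Int)) + 2 * c))),
         idx + m * (1 + 2 * (cols.toNat : Int))) := by
  induction m with
  | zero => simp
  | succ m ih =>
      rw [List.range_succ, List.map_append, List.foldl_append, ih]
      show pvOuterA cols _ _ = _
      unfold pvOuterA
      have hr : PySem.List.pyRange 0 cols 1
          = (List.range cols.toNat).map (fun k : Nat => (k : Int)) := by
        rw [PySem.List.pyRange_one]; simp
      rw [hr, pvInner_closed]
      rw [Prod.mk.injEq]
      refine ⟨?_, by push_cast; ring⟩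
      rw [List.flatMap_append]
      simp
      intro a _
      ring

-- ===== VERDICT (by name: the statement is the Claim_ definition above) =====
theorem calculate_cell_positions_spec : Claim_equal_calculate_cell_positions := by
  intro ts rows cols _
  show calculate_cell_positions ts rows cols = calculate_cell_positions_alt ts rows cols
  unfold calculate_cell_positions calculate_cell_positions_alt
  have hr : ∀ b : Int, PySem.List.pyRange 0 b 1
      = (List.range b.toNat).map (fun k : Nat => (k : Int)) := by
    intro b; rw [PySem.List.pyRange_one]; simp
  rw [hr rows, hr cols, pvOuter_closed]
  simp only [List.flatMap_map, List.map_map, List.nil_append]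
  rcases (by omega : 0 ≤ cols ∨ cols < 0) with hc | hc
  · have : ((cols.toNat : Int)) = cols := Int.toNat_of_nonneg hc
    rw [this]
    apply List.flatMap_congr
    intro r _
    apply List.map_congr_left
    intro c _
    simp [Function.comp]
    ring
  · have : cols.toNat = 0 := by omega
    simp [this]
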